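-- pv_equiv track=rewrite | github.com/HugoDemRey/CS451-2024-project | template_java/src/main/java/cs451/tests/verify_correctness.py | check_frb2
-- ===== SOURCE A (Python) =====
-- def check_frb2(delivered):
--     violations = []
--     for receiver_id, delivered_messages in delivered.items():
--         unique_messages = set()
--         for msg in delivered_messages:
--             if msg in unique_messages:
--                 violations.append(
--                     f"FRB2 Violation: Message {msg[1]} from sender {msg[0]} was delivered more than once by process {receiver_id}."
--                 )
--             else:
--                 unique_messages.add(msg)
--     return violations
-- ===== SOURCE B (Python) =====
-- def check_frb2(delivered):
--     violations = []
--     for receiver_id, delivered_messages in delivered.items():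
--         first = {}
--         for i, msg in enumerate(delivered_messages):
--             first.setdefault(msg, i)
--         for i, msg in enumerate(delivered_messages):
--             if first[msg] != i:
--                 violations.append(
--                     f"FRB2 Violation: Message {msg[1]} from sender {msg[0]} was delivered more than once by process {receiver_id}."
--                 )
--     return violations
-- ===== Notes on version B (the rewrite author's own statement) =====
-- stated objective: alternative
-- what changed: Instead of A's single pass per receiver with a growing seen-set, B makes two staged passes: it first builds a dict mapping each message to its first occurrence index (setdefault), then emits a violation at every position whose index differs from that first occurrence.
import Mathlib
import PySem

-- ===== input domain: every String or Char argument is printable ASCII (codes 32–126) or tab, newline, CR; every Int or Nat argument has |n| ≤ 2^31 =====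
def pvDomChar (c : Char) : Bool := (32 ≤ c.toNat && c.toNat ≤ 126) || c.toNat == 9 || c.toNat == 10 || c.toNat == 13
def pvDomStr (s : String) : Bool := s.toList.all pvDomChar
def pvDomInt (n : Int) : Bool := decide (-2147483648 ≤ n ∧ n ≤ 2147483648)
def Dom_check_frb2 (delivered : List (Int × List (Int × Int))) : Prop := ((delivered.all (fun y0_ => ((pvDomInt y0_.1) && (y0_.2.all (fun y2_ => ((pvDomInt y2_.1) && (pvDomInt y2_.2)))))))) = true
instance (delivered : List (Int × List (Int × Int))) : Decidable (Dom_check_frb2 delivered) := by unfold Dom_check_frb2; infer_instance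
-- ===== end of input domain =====

-- B replaces A's on-line duplicate set by two staged passes per receiver: first build a
-- first-occurrence-index dict, then emit a violation at every position whose first occurrence
-- is elsewhere; same return value, no speed claim.

-- the f-string both versions build (identical literal text in both Pythons)
def frb2Msg (receiver : Int) (msg : Int × Int) : String :=
  "FRB2 Violation: Message " ++ PySem.Int.toStr msg.2 ++ " from sender " ++ PySem.Int.toStr msg.1
    ++ " was delivered more than once by process " ++ PySem.Int.toStr receiver ++ "."

-- ===== PORT A =====
def check_frb2 (delivered : List (Int × List (Int × Int))) : List String :=
  delivered.foldl (fun violations p =>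
    (p.2.foldl (fun (st : List String × PySem.Set (Int × Int)) msg =>
        if PySem.Set.contains st.2 msg then (st.1 ++ [frb2Msg p.1 msg], st.2)
        else (st.1, PySem.Set.add st.2 msg))
      (violations, PySem.Set.empty)).1) []

-- ===== PORT B =====
-- pass 1: first.setdefault(msg, i) over enumerate(delivered_messages)
def frb2First (ms : List (Int × Int)) : PySem.Dict (Int × Int) Int :=
  (PySem.List.enumerate ms).foldl (fun d im => d.setdefault im.2 im.1) PySem.Dict.empty
-- pass 2: first[msg] != i  (the key is always present, so first[msg] is get?)
def check_frb2_alt (delivered : List (Int × List (Int × Int))) : List String :=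
  delivered.foldl (fun violations p =>
    let first := frb2First p.2
    (PySem.List.enumerate p.2).foldl (fun vs im =>
      if first.get? im.2 ≠ some im.1 then vs ++ [frb2Msg p.1 im.2] else vs) violations) []

-- ===== PRECONDITION & SPEC =====
def Spec_check_frb2 (delivered : List (Int × List (Int × Int))) (out : List String) : Prop := out = check_frb2_alt delivered
instance (delivered : List (Int × List (Int × Int))) (out : List String) : Decidable (Spec_check_frb2 delivered out) := by unfold Spec_check_frb2; infer_instance

-- ===== CLAIM (what is proved, stated in full; the proofs are below) =====
def Claim_equal_check_frb2 : Prop := ∀ (delivered : List (Int × List (Int × Int))), Dom_check_frb2 delivered → Spec_check_frb2 delivered (check_frb2 delivered)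

-- ===== LEMMAS AND PROOFS =====

-- reference recursion: for each message, emit iff already among the earlier messages
def bAux (r : Int) (seen ms : List (Int × Int)) : List String :=
  match ms with
  | [] => []
  | m :: t => (if seen.contains m then [frb2Msg r m] else []) ++ bAux r (seen ++ [m]) t

-- the first-pass dict looks up the first index of a key
lemma frb2First_get :
    ∀ (ms : List (Int × Int)) (k : Int) (d : PySem.Dict (Int × Int) Int) (m : Int × Int),
      ((PySem.List.enumerate ms k).foldl (fun d im => d.setdefault im.2 im.1) d).get? m
        = (d.get? m).or ((List.idxOf? m ms).map (fun j => k + (j : Int))) := by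
  intro ms
  induction ms with
  | nil => intro k d m; simp [PySem.List.enumerate_nil]
  | cons x t ih =>
    intro k d m
    simp only [PySem.List.enumerate_cons, List.foldl_cons, List.idxOf?_cons]
    rw [ih]
    by_cases hxm : x = m
    · subst hxm
      rw [PySem.Dict.get?_setdefault_self]
      cases d.get? x <;> simp
    · rw [PySem.Dict.get?_setdefault_of_ne _ _ (Ne.symm hxm)]
      have : (x == m) = false := by simp [hxm]
      simp only [this, Bool.false_eq_true, if_false]
      congr 1
      cases List.idxOf? m t <;> simp; ring

-- the second-pass condition at position i, element m, is "m occurs earlier"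
lemma cond_iff (L : List (Int × Int)) (i : Nat) (m : Int × Int) (h : L[i]? = some m) :
    ((frb2First L).get? m ≠ some (i : Int)) ↔ m ∈ L.take i := by
  have hlen : i < L.length := (List.getElem?_eq_some_iff.mp h).1
  have hLi : L[i] = m := (List.getElem?_eq_some_iff.mp h).2
  have hmem : m ∈ L := hLi ▸ List.getElem_mem hlen
  obtain ⟨j, hj⟩ := Option.isSome_iff_exists.mp (List.isSome_idxOf?.mpr hmem)
  obtain ⟨hjlen, hLj, hmin⟩ := List.idxOf?_eq_some_iff.mp hj
  have hget : (frb2First L).get? m = some (j : Int) := by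
    rw [frb2First, frb2First_get L 0 PySem.Dict.empty m, PySem.Dict.get?_empty, hj]
    simp
  have hji : j ≤ i := by
    by_contra hlt
    exact hmin i (by omega) hLi
  rw [hget]
  constructor
  · intro hne
    have hji' : j < i := by
      rcases Nat.lt_or_ge j i with h' | h'
      · exact h'
      · exfalso; apply hne; congr 1; omega
    exact List.mem_take_iff_getElem.mpr ⟨j, by omega, hLj⟩
  · intro hmt hsome
    obtain ⟨j', hj'lt, hLj'⟩ := List.mem_take_iff_getElem.mp hmt
    have hji' : j = i := by exact_mod_cast Option.some.inj hsome
    exact hmin j' (by omega) hLj'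

-- B's second pass equals the reference recursion
lemma B_inner (r : Int) (L : List (Int × Int)) :
    ∀ (ms : List (Int × Int)) (k : Nat) (acc : List String), L.drop k = ms →
      (PySem.List.enumerate ms (k : Int)).foldl (fun vs im =>
          if (frb2First L).get? im.2 ≠ some im.1 then vs ++ [frb2Msg r im.2] else vs) acc
        = acc ++ bAux r (L.take k) ms := by
  intro ms
  induction ms with
  | nil => intro k acc _; simp [PySem.List.enumerate_nil, bAux]
  | cons m t ih =>
    intro k acc hk
    have hdrop : L.drop (k + 1) = t := by
      have h1 : L.drop (k + 1) = (L.drop k).drop 1 := by rw [List.drop_drop]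
      simp [h1, hk]
    have hget : L[k]? = some m := by
      have h1 : (L.drop k)[0]? = L[k + 0]? := List.getElem?_drop
      simpa [hk] using h1.symm
    have htake : L.take (k + 1) = L.take k ++ [m] := by
      rw [List.take_add_one]; simp [hget]
    have hcast : ((k : Int) + 1) = ((k + 1 : Nat) : Int) := by push_cast; ring
    have hiff := cond_iff L k m hget
    simp only [PySem.List.enumerate_cons, List.foldl_cons, hcast, bAux]
    rw [ih (k + 1) _ hdrop, htake]
    by_cases hmem : m ∈ L.take k
    · have hc : ((frb2First L).get? m ≠ some (k : Int)) := hiff.mpr hmem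
      simp [hc, hmem]
    · have hc : ¬ ((frb2First L).get? m ≠ some (k : Int)) := fun h => hmem (hiff.mp h)
      simp [hc, hmem]

-- A's inner loop equals the reference recursion
lemma A_inner (r : Int) :
    ∀ (ms : List (Int × Int)) (s : PySem.Set (Int × Int)) (seen : List (Int × Int))
      (acc : List String), (∀ x, x ∈ s ↔ x ∈ seen) →
      (ms.foldl (fun (st : List String × PySem.Set (Int × Int)) msg =>
          if PySem.Set.contains st.2 msg then (st.1 ++ [frb2Msg r msg], st.2)
          else (st.1, PySem.Set.add st.2 msg)) (acc, s)).1
        = acc ++ bAux r seen ms := by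
  intro ms
  induction ms with
  | nil => intro s seen acc _; simp [bAux]
  | cons m t ih =>
    intro s seen acc hinv
    by_cases hm : m ∈ s
    · have hc : PySem.Set.contains s m = true := (PySem.Set.contains_iff s m).mpr hm
      have hmseen : m ∈ seen := (hinv m).mp hm
      have hinv' : ∀ x, x ∈ s ↔ x ∈ (seen ++ [m]) := by
        intro x; rw [hinv x]; constructor
        · intro h; simp [h]
        · intro h; rcases List.mem_append.mp h with h | h
          · exact h
          · simp at h; subst h; exact hmseen
      simp only [List.foldl_cons, hc, if_true]
      rw [ih s (seen ++ [m]) (acc ++ [frb2Msg r m]) hinv']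
      simp [bAux, hmseen]
    · have hc : PySem.Set.contains s m = false := by
        by_contra h
        exact hm ((PySem.Set.contains_iff s m).mp (by simpa using h))
      have hmseen : m ∉ seen := fun h => hm ((hinv m).mpr h)
      have hinv' : ∀ x, x ∈ PySem.Set.add s m ↔ x ∈ (seen ++ [m]) := by
        intro x
        rw [PySem.Set.mem_add]
        rw [hinv x]
        simp [or_comm, eq_comm]
      simp only [List.foldl_cons, hc, Bool.false_eq_true, if_false]
      rw [ih (PySem.Set.add s m) (seen ++ [m]) acc hinv']
      simp [bAux, hmseen]

-- both per-receiver computations produce acc ++ bAux r [] ms, so the outer folds agree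
lemma outer (delivered : List (Int × List (Int × Int))) :
    ∀ acc : List String,
      delivered.foldl (fun violations p =>
        (p.2.foldl (fun (st : List String × PySem.Set (Int × Int)) msg =>
            if PySem.Set.contains st.2 msg then (st.1 ++ [frb2Msg p.1 msg], st.2)
            else (st.1, PySem.Set.add st.2 msg)) (violations, PySem.Set.empty)).1) acc
      = delivered.foldl (fun violations p =>
          (PySem.List.enumerate p.2).foldl (fun vs im =>
            if (frb2First p.2).get? im.2 ≠ some im.1 then vs ++ [frb2Msg p.1 im.2] else vs) violations) acc := by
  induction delivered with
  | nil => intro acc; rfl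
  | cons p rest ih =>
    intro acc
    simp only [List.foldl_cons]
    rw [A_inner p.1 p.2 PySem.Set.empty [] acc (by simp [PySem.Set.empty])]
    have hb := B_inner p.1 p.2 p.2 0 acc (by simp)
    simp only [Nat.cast_zero, List.take_zero] at hb
    rw [hb, ih]

-- ===== VERDICT (by name: the statement is the Claim_ definition above) =====
theorem check_frb2_spec : Claim_equal_check_frb2 := by
  intro delivered _
  show check_frb2 delivered = check_frb2_alt delivered
  unfold check_frb2 check_frb2_alt
  exact outer delivered []
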